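-- pv_equiv track=rewrite | github.com/mrexodia/ida-pro-mcp | src/ida_pro_mcp/ida_mcp/fast_str.py | _has_regex_meta
-- ===== SOURCE A (Python) =====
-- def _has_regex_meta(pattern: str) -> bool:
--     escape = False
--     for ch in pattern:
--         if escape:
--             escape = False
--             continue
--         if ch == "\\":
--             return True
--         if ch in ".^$*+?{}[]|()":
--             return True
--     return False
-- ===== SOURCE B (Python) =====
-- META = "\\.^$*+?{}[]|()"
--
-- def _has_regex_meta(pattern: str) -> bool:
--     return any(m in pattern for m in META)
-- ===== Notes on version B (the rewrite author's own statement) =====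
-- stated objective: idiomatic
-- what changed: Swaps the loop roles: instead of one escape-flag scan over the pattern testing each char against a metachar string, B iterates over the 14 metacharacters (backslash included, making A's escape flag irrelevant) and does a substring search of the pattern for each.
import Mathlib
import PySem

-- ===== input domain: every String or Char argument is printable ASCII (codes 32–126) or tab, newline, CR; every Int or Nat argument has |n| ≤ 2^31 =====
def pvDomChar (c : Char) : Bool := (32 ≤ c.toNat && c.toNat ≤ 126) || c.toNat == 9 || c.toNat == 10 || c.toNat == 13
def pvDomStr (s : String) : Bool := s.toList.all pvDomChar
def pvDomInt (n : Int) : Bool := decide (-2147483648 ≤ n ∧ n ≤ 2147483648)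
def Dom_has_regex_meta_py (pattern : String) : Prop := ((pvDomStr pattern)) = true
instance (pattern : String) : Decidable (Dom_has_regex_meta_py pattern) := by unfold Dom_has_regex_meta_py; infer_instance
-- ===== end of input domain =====

-- B swaps the loop roles: it iterates over the 14 metacharacters (backslash included) and
-- substring-searches the pattern for each, instead of A's escape-flag scan over the pattern (idiomatic).

-- ===== PORT A =====
-- A's loop with its escape flag, transliterated as structural recursion over the chars
def pvALoop : List Char → Bool → Bool
  | [], _ => false
  | ch :: rest, escape =>
    if escape then pvALoop rest false
    else if ch = '\\' then true
    else if (".^$*+?{}[]|()".toList.contains ch) then true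
    else pvALoop rest escape

def has_regex_meta_py (pattern : String) : Bool := pvALoop pattern.toList false

-- ===== PORT B =====
def pvMETA : String := "\\.^$*+?{}[]|()"

-- any(m in pattern for m in META): loop over the metachars, substring search per metachar
def has_regex_meta_py_alt (pattern : String) : Bool :=
  pvMETA.toList.any (fun m => PySem.Str.isIn (String.ofList [m]) pattern)

-- ===== PRECONDITION & SPEC =====
def Spec_has_regex_meta_py (pattern : String) (out : Bool) : Prop := out = has_regex_meta_py_alt pattern
instance (pattern : String) (out : Bool) : Decidable (Spec_has_regex_meta_py pattern out) := by unfold Spec_has_regex_meta_py; infer_instance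

-- ===== CLAIM (what is proved, stated in full; the proofs are below) =====
def Claim_equal_has_regex_meta_py : Prop := ∀ (pattern : String), Dom_has_regex_meta_py pattern → Spec_has_regex_meta_py pattern (has_regex_meta_py pattern)

-- ===== LEMMAS AND PROOFS =====

-- A's loop (started with escape = false) returns true iff some char of the pattern is a metacharacter
lemma pvALoop_eq_any (l : List Char) :
    pvALoop l false = l.any (fun c => c ∈ pvMETA.toList) := by
  have hL : ".^$*+?{}[]|()".toList
      = ['.','^','$','*','+','?','{','}','[',']','|','(',')'] := by decide
  have hB : pvMETA.toList
      = '\\' :: ['.','^','$','*','+','?','{','}','[',']','|','(',')'] := by decide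
  induction l with
  | nil => rfl
  | cons c rest ih =>
    simp only [pvALoop, List.any_cons, ih, hL, hB]
    by_cases hb : c = '\\'
    · simp [hb]
    · by_cases hm : c ∈ (['.','^','$','*','+','?','{','}','[',']','|','(',')'] : List Char)
      · simp [hb, hm]
      · simp [hb, hm]

-- a one-char string occurs as a substring iff the char occurs in the list
lemma singleton_infix_iff_mem (m : Char) (l : List Char) : [m] <:+: l ↔ m ∈ l := by
  constructor
  · intro h
    exact h.sublist.subset (List.mem_singleton_self m)
  · intro h
    rcases List.append_of_mem h with ⟨s, t, rfl⟩
    exact ⟨s, t, by simp⟩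

theorem has_regex_meta_py_spec : Claim_equal_has_regex_meta_py := by
  intro pattern _
  unfold Spec_has_regex_meta_py has_regex_meta_py has_regex_meta_py_alt
  rw [pvALoop_eq_any, Bool.eq_iff_iff]
  simp only [List.any_eq_true, decide_eq_true_eq, PySem.Str.isIn_iff_infix]
  constructor
  · rintro ⟨c, hc, hm⟩
    have hto : (String.ofList [c]).toList = [c] := by simp
    exact ⟨c, hm, by rw [hto]; exact (singleton_infix_iff_mem c _).mpr hc⟩
  · rintro ⟨m, hm, hin⟩
    refine ⟨m, ?_, hm⟩
    have hto : (String.ofList [m]).toList = [m] := by simp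
    rw [hto] at hin
    exact (singleton_infix_iff_mem m _).mp hin
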